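-- pv_equiv track=rewrite | github.com/apple/ml-lucid-datagen | running_baseline/utils_eval_metrics.py | parse_slots_from_assignent
-- ===== SOURCE A (Python) =====
-- def parse_slots_from_assignent(command, idx, context, all_intents):
--
--     command = command.strip()
--     slots = command[: command.find("=")]
--
--     slots_list = [x.strip() for x in slots.split(",")]
--     slots_list = update_slots_with_original_intent(slots_list, context, all_intents)
--
--     values = command[command.find("=") + 1 :]
--
--     values_split_points = get_comma_split_points(values)
--
--     values_list = [
--         values[i + 1 : j].strip().lower()
--         for (i, j) in zip([-1] + values_split_points, values_split_points + [len(command)])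
--     ]
--
--     if len(slots_list) != len(values_list):
--         return None
--
--     else:
--         return_dict = {}
--         for i in range(len(slots_list)):
--             return_dict[slots_list[i]] = values_list[i]
--         return return_dict
--
-- def update_slots_with_original_intent(slots, context, all_intents):
--
--     new_slots_list = []
--
--     for slot in slots:
--         idx = slot[1 : slot.find(".")]
--         intent = find_intent_from_context(context, idx, all_intents)
--         if intent:
--             new_slots_list.append(intent + "." + slot)
--         else:
--             new_slots_list.append("UNKNOWN_SLOT")
--
--     return new_slots_list
--
-- def get_comma_split_points(command):
--
--     quotes_opened = False
--     comma_splits = []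
--
--     for idx, char in enumerate(command):
--
--         if char == '"':
--             quotes_opened = not quotes_opened
--         if not quotes_opened and char == ",":
--             comma_splits.append(idx)
--
--     return comma_splits
--
-- def find_intent_from_context(context, idx, all_intents):
--
--     for line in context.split("\n"):
--         line = line.strip()
--         if line.startswith(str(idx) + " "):
--             for intent in all_intents:
--                 if line[line.find(" ") + 1 :].startswith(intent + "("):
--                     return "turn" + str(idx) + "." + intent
--
--     return None
-- ===== SOURCE B (Python) =====
-- def parse_slots_from_assignent(command, idx, context, all_intents):
--     command = command.strip()
--     eq = command.find("=")
--     slots_part = command[:eq]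
--     values_part = command[eq + 1:]
--
--     # Build, in ONE pass over the context, a per-line table:
--     # (stripped line, first intent whose post-space remainder starts it, or None)
--     line_info = []
--     for raw_line in context.split("\n"):
--         line = raw_line.strip()
--         rest = line[line.find(" ") + 1:]
--         intent_here = None
--         for intent in all_intents:
--             if rest.startswith(intent + "("):
--                 intent_here = intent
--                 break
--         line_info.append((line, intent_here))
--
--     slots_list = []
--     for raw_slot in slots_part.split(","):
--         slot = raw_slot.strip()
--         sidx = slot[1:slot.find(".")]
--         prefix = sidx + " "
--         label = "UNKNOWN_SLOT"
--         for line, intent_here in line_info: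
--             if intent_here is not None and line.startswith(prefix):
--                 label = "turn" + sidx + "." + intent_here + "." + slot
--                 break
--         slots_list.append(label)
--
--     values_split_points = get_comma_split_points(values_part)
--
--     values_list = [
--         values_part[i + 1 : j].strip().lower()
--         for (i, j) in zip([-1] + values_split_points, values_split_points + [len(command)])
--     ]
--
--     if len(slots_list) != len(values_list):
--         return None
--     return dict(zip(slots_list, values_list))
--
--
-- def get_comma_split_points(command):
--     quotes_opened = False
--     comma_splits = []
--     for idx, char in enumerate(command):
--         if char == '"':
--             quotes_opened = not quotes_opened
--         if not quotes_opened and char == ",":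
--             comma_splits.append(idx)
--     return comma_splits
-- ===== Notes on version B (the rewrite author's own statement) =====
-- stated objective: alternative
-- what changed: Intent resolution is restructured: instead of re-scanning all context lines and all intents for every slot, B scans the context once to build a per-line table (stripped line, first matching intent) and each slot then only scans that table; the result dict is built with dict(zip(...)) instead of an index loop.
import Mathlib
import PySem

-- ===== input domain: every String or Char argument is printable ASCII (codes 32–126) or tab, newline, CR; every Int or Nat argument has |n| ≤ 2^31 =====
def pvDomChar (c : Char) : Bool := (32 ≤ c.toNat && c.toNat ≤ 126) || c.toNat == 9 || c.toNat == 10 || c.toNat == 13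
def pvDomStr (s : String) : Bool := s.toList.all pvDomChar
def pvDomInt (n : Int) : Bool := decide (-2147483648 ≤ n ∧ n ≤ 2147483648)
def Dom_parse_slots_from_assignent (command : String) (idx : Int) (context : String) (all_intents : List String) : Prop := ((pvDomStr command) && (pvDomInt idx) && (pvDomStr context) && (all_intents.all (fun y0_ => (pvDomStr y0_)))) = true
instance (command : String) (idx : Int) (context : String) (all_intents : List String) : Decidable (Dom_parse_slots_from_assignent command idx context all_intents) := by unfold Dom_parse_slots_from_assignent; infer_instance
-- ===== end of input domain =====

-- B restructures intent resolution: one pass over the context builds a per-line table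
-- (stripped line, first matching intent), each slot then only scans that table; the
-- result dict is built by folding over the zipped lists instead of an index loop.
-- Equivalence of return values is proved on the whole domain (A is total).

-- ===== PORT A =====
-- inner 'for intent in all_intents' scan (identical code in Source A and Source B)
def pvIntentMatch (rest : List Char) : List String → Option (List Char)
  | [] => none
  | i :: is =>
    if PySem.Chars.startswith rest (i.toList ++ ['(']) then some i.toList
    else pvIntentMatch rest is

-- get_comma_split_points (identical helper in Source A and Source B)
def pvSplitPointsLoop : List (Int × Char) → Bool → List Int → List Int
  | [], _, acc => acc
  | (i, c) :: rest, q, acc =>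
    let q' := if c = '"' then !q else q
    let acc' := if !q' && c = ',' then acc ++ [i] else acc
    pvSplitPointsLoop rest q' acc'

def pvSplitPoints (cs : List Char) : List Int :=
  pvSplitPointsLoop (PySem.List.enumerate cs) false []

-- the values-list comprehension (identical code in Source A and Source B)
def pvValuesList (values : List Char) (cmdLen : Int) : List (List Char) :=
  let pts := pvSplitPoints values
  ((-1 :: pts).zip (pts ++ [cmdLen])).map
    (fun p => PySem.Chars.lower (PySem.Chars.strip (PySem.List.slice values (some (p.1 + 1)) (some p.2))))

-- find_intent_from_context
def pvFindIntentA (lines : List (List Char)) (idx : List Char) (intents : List String) : Option (List Char) :=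
  match lines with
  | [] => none
  | l :: ls =>
    let line := PySem.Chars.strip l
    if PySem.Chars.startswith line (idx ++ [' ']) then
      match pvIntentMatch (PySem.List.slice line (some (PySem.Chars.find line [' '] + 1)) none) intents with
      | some i => some ("turn".toList ++ idx ++ ['.'] ++ i)
      | none => pvFindIntentA ls idx intents
    else pvFindIntentA ls idx intents

-- update_slots_with_original_intent
def pvUpdateSlotsA (slots : List (List Char)) (lines : List (List Char)) (intents : List String) : List (List Char) :=
  match slots with
  | [] => []
  | s :: ss =>
    (match pvFindIntentA lines (PySem.List.slice s (some 1) (some (PySem.Chars.find s ['.']))) intents with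
     | some it => it ++ ['.'] ++ s
     | none => "UNKNOWN_SLOT".toList) :: pvUpdateSlotsA ss lines intents

def parse_slots_from_assignent (command : String) (idx : Int) (context : String) (all_intents : List String) : Option (List (String × String)) :=
  let cmd := PySem.Chars.strip command.toList
  let f := PySem.Chars.find cmd ['=']
  let slots := PySem.List.slice cmd none (some f)
  let slots_list0 := (PySem.Chars.splitOn slots [',']).map PySem.Chars.strip
  let slots_list := pvUpdateSlotsA slots_list0 (PySem.Chars.splitOn context.toList ['\n']) all_intents
  let values := PySem.List.slice cmd (some (f + 1)) none
  let values_list := pvValuesList values (cmd.length : Int)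
  if slots_list.length ≠ values_list.length then none
  else some ((PySem.List.pyRange 0 (slots_list.length : Int) 1).foldl
      (fun d i => d.insert (String.ofList (PySem.List.pyGetD slots_list i []))
                           (String.ofList (PySem.List.pyGetD values_list i [])))
      PySem.Dict.empty).items

-- ===== PORT B =====
-- one pass over the context: per line, the stripped line and its first matching intent
def pvLineInfo (intents : List String) (lines : List (List Char)) : List (List Char × Option (List Char)) :=
  lines.map (fun l =>
    let line := PySem.Chars.strip l
    (line, pvIntentMatch (PySem.List.slice line (some (PySem.Chars.find line [' '] + 1)) none) intents))

def pvLookup (info : List (List Char × Option (List Char))) (pre : List Char) : Option (List Char) :=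
  match info with
  | [] => none
  | (l, oi) :: rest =>
    match oi with
    | some i => if PySem.Chars.startswith l pre then some i else pvLookup rest pre
    | none => pvLookup rest pre

def pvSlotsB (info : List (List Char × Option (List Char))) (slots : List (List Char)) : List (List Char) :=
  slots.map (fun raw =>
    let s := PySem.Chars.strip raw
    let sidx := PySem.List.slice s (some 1) (some (PySem.Chars.find s ['.']))
    match pvLookup info (sidx ++ [' ']) with
    | some it => "turn".toList ++ sidx ++ ['.'] ++ it ++ ['.'] ++ s
    | none => "UNKNOWN_SLOT".toList)

def parse_slots_from_assignent_alt (command : String) (idx : Int) (context : String) (all_intents : List String) : Option (List (String × String)) :=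
  let cmd := PySem.Chars.strip command.toList
  let eq := PySem.Chars.find cmd ['=']
  let slots_part := PySem.List.slice cmd none (some eq)
  let values_part := PySem.List.slice cmd (some (eq + 1)) none
  let info := pvLineInfo all_intents (PySem.Chars.splitOn context.toList ['\n'])
  let slots_list := pvSlotsB info (PySem.Chars.splitOn slots_part [','])
  let values_list := pvValuesList values_part (cmd.length : Int)
  if slots_list.length ≠ values_list.length then none
  else some (((slots_list.map String.ofList).zip (values_list.map String.ofList)).foldl
      (fun d p => d.insert p.1 p.2) PySem.Dict.empty).items

-- ===== PRECONDITION & SPEC =====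
def Spec_parse_slots_from_assignent (command : String) (idx : Int) (context : String) (all_intents : List String) (out : Option (List (String × String))) : Prop := out = parse_slots_from_assignent_alt command idx context all_intents
instance (command : String) (idx : Int) (context : String) (all_intents : List String) (out : Option (List (String × String))) : Decidable (Spec_parse_slots_from_assignent command idx context all_intents out) := by unfold Spec_parse_slots_from_assignent; infer_instance

-- ===== CLAIM (what is proved, stated in full; the proofs are below) =====
def Claim_equal_parse_slots_from_assignent : Prop := ∀ (command : String) (idx : Int) (context : String) (all_intents : List String), Dom_parse_slots_from_assignent command idx context all_intents → Spec_parse_slots_from_assignent command idx context all_intents (parse_slots_from_assignent command idx context all_intents)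

-- ===== LEMMAS AND PROOFS =====

-- A's per-slot context scan equals a lookup in B's precomputed table.
theorem pvFindIntentA_eq_lookup (lines : List (List Char)) (idx : List Char) (intents : List String) :
    pvFindIntentA lines idx intents
      = (pvLookup (pvLineInfo intents lines) (idx ++ [' '])).map
          (fun i => "turn".toList ++ idx ++ ['.'] ++ i) := by
  induction lines with
  | nil => simp [pvFindIntentA, pvLineInfo, pvLookup]
  | cons l ls ih =>
    simp only [pvFindIntentA, pvLineInfo, List.map_cons, pvLookup]
    cases h : pvIntentMatch (PySem.List.slice (PySem.Chars.strip l)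
        (some (PySem.Chars.find (PySem.Chars.strip l) [' '] + 1)) none) intents with
    | none =>
      cases hs : PySem.Chars.startswith (PySem.Chars.strip l) (idx ++ [' ']) <;>
        simp [hs, h, pvLineInfo, ih]
    | some i =>
      cases hs : PySem.Chars.startswith (PySem.Chars.strip l) (idx ++ [' ']) <;>
        simpa [hs, h, pvLineInfo] using ih

theorem pvUpdateSlotsA_eq_pvSlotsB (slots : List (List Char)) (lines : List (List Char)) (intents : List String) :
    pvUpdateSlotsA (slots.map PySem.Chars.strip) lines intents
      = pvSlotsB (pvLineInfo intents lines) slots := by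
  induction slots with
  | nil => simp [pvUpdateSlotsA, pvSlotsB]
  | cons s ss ih =>
    simp only [List.map_cons, pvUpdateSlotsA, pvSlotsB, List.map_cons] at *
    rw [pvFindIntentA_eq_lookup]
    cases h : pvLookup (pvLineInfo intents lines)
        (PySem.List.slice (PySem.Chars.strip s)
          (some 1) (some (PySem.Chars.find (PySem.Chars.strip s) ['.'])) ++ [' ']) <;>
      simp only [h, Option.map_some, Option.map_none] <;> exact congrArg _ ih

-- the indexed pairs over range(len) are exactly the zip of the two lists
theorem pv_map_range_eq_zip (ks vs : List (List Char)) (h : ks.length = vs.length) :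
    (PySem.List.pyRange 0 (ks.length : Int) 1).map
        (fun i => (PySem.List.pyGetD ks i ([] : List Char), PySem.List.pyGetD vs i ([] : List Char)))
      = ks.zip vs := by
  rw [PySem.List.pyRange_zero_nat]
  apply List.ext_getElem
  · simp [h]
  · intro n h1 h2
    simp only [List.getElem_map, List.getElem_range, List.getElem_zip]
    simp only [List.length_map, List.length_range] at h1
    rw [PySem.List.pyGetD_natCast, PySem.List.pyGetD_natCast,
        List.getD_eq_getElem _ _ h1, List.getD_eq_getElem _ _ (by omega)]

-- A's index-loop dict build equals B's fold over the zipped (already stringified) lists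
theorem pv_dict_build_eq (ks vs : List (List Char)) (h : ks.length = vs.length) :
    (PySem.List.pyRange 0 (ks.length : Int) 1).foldl
        (fun d i => d.insert (String.ofList (PySem.List.pyGetD ks i []))
                             (String.ofList (PySem.List.pyGetD vs i [])))
        PySem.Dict.empty
      = ((ks.map String.ofList).zip (vs.map String.ofList)).foldl
          (fun d p => d.insert p.1 p.2) PySem.Dict.empty := by
  have hz : (ks.map String.ofList).zip (vs.map String.ofList)
      = (ks.zip vs).map (Prod.map String.ofList String.ofList) := by
    rw [List.zip_map]
  rw [hz, ← pv_map_range_eq_zip ks vs h, List.map_map, List.foldl_map]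
  rfl

-- ===== VERDICT (by name: the statement is the Claim_ definition above) =====
theorem parse_slots_from_assignent_spec : Claim_equal_parse_slots_from_assignent := by
  intro command idx context all_intents _
  show _ = _
  simp only [parse_slots_from_assignent, parse_slots_from_assignent_alt]
  rw [pvUpdateSlotsA_eq_pvSlotsB]
  split_ifs with hlen
  · rfl
  · rw [pv_dict_build_eq _ _ (by omega)]
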